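-- pv_equiv track=rewrite | github.com/soumyadipghorai/DSA-IITM | week10/graded/grpa2.py | stringmatchrev
-- ===== SOURCE A (Python) =====
-- def stringmatchrev(t, p):
--     poslist = []
--     for i in range(len(t) - len(p) + 1):
--         matched = True
--         j = len(p) - 1
--         while j >= 0 and matched:
--             if t[i+j] != p[j] and p[j] != "$":
--                 matched = False
--             j -= 1
--         if matched:
--             poslist.append((i, t[i:i+len(p)]))
--     return(poslist)
-- ===== SOURCE B (Python) =====
-- def stringmatchrev(t, p):
--     n, m = len(t), len(p)
--     if m > n:
--         return []
--     masks = {}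
--     for i, c in enumerate(t):
--         masks[c] = masks.get(c, 0) | (1 << i)
--     cand = (1 << (n - m + 1)) - 1
--     for j, c in enumerate(p):
--         if c != "$":
--             cand &= masks.get(c, 0) >> j
--     return [(i, t[i:i+m]) for i in range(n - m + 1) if (cand >> i) & 1]
-- ===== Notes on version B (the rewrite author's own statement) =====
-- stated objective: alternative
-- what changed: Replaced A's per-position right-to-left character rescan by bitap (Shift-Or style) wildcard matching: one pass over the text builds a position bitmask per character, then one big-integer AND per non-wildcard pattern position computes all match positions at once.
import Mathlib
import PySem

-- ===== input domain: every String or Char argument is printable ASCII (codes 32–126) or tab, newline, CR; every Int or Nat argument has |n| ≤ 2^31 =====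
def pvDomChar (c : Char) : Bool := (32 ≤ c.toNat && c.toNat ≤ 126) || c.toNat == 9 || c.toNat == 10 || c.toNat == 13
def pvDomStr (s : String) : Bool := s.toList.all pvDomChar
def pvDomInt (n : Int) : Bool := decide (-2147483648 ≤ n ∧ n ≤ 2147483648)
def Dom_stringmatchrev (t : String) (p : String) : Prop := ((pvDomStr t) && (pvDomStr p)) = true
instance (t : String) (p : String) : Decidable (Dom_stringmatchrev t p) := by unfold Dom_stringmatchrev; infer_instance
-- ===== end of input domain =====

-- B is an alternative algorithm: bitap (Shift-Or style) wildcard matching — one position bitmask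
-- per text character, one big-integer AND per non-wildcard pattern position; same return value.

-- ===== PORT A =====
-- inner 'while j >= 0 and matched' loop of A; t[i+j] and p[j] read via pyGet?
-- (in A's calls i+j and j are always in range, so the Option comparison is exact there)
def pvAInner (tl pl : List Char) (i : Int) (j : Int) (matched : Bool) : Bool :=
  if h : 0 ≤ j ∧ matched = true then
    pvAInner tl pl i (j - 1)
      (if PySem.List.pyGet? tl (i + j) ≠ PySem.List.pyGet? pl j ∧ PySem.List.pyGet? pl j ≠ some '$'
       then false else matched)
  else matched
termination_by (j + 1).toNat
decreasing_by omega

def stringmatchrev (t : String) (p : String) : List (Int × String) :=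
  (PySem.List.pyRange 0 ((t.toList.length : Int) - (p.toList.length : Int) + 1) 1).foldl
    (fun poslist i =>
      if pvAInner t.toList p.toList i ((p.toList.length : Int) - 1) true then
        poslist ++ [(i, String.ofList (PySem.List.slice t.toList (some i) (some (i + (p.toList.length : Int)))))]
      else poslist)
    []

-- ===== PORT B =====
-- masks[c] = bitmask of the positions of c in t   (the first loop of Source B)
def pvBMasks (tl : List Char) : PySem.Dict Char Nat :=
  (PySem.List.enumerate tl).foldl
    (fun d ic => d.insert ic.2 ((d.getD ic.2 0) ||| (1 <<< ic.1.toNat))) PySem.Dict.empty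

-- cand &= masks.get(c, 0) >> j for every non-wildcard pattern position   (the second loop of Source B)
def pvBCand (masks : PySem.Dict Char Nat) (pl : List Char) (start : Nat) : Nat :=
  (PySem.List.enumerate pl).foldl
    (fun c jc => if jc.2 ≠ '$' then c &&& ((masks.getD jc.2 0) >>> jc.1.toNat) else c) start

def stringmatchrev_alt (t : String) (p : String) : List (Int × String) :=
  if p.toList.length > t.toList.length then []
  else
    (PySem.List.pyRange 0 ((t.toList.length : Int) - (p.toList.length : Int) + 1) 1).filterMap
      (fun i => if (pvBCand (pvBMasks t.toList) p.toList
                      ((1 <<< (t.toList.length - p.toList.length + 1)) - 1) >>> i.toNat) &&& 1 = 1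
                then some (i, String.ofList (PySem.List.slice t.toList (some i) (some (i + (p.toList.length : Int)))))
                else none)

-- ===== PRECONDITION & SPEC =====
def Spec_stringmatchrev (t : String) (p : String) (out : List (Int × String)) : Prop := out = stringmatchrev_alt t p
instance (t : String) (p : String) (out : List (Int × String)) : Decidable (Spec_stringmatchrev t p out) := by unfold Spec_stringmatchrev; infer_instance

-- ===== CLAIM (what is proved, stated in full; the proofs are below) =====
def Claim_equal_stringmatchrev : Prop := ∀ (t : String) (p : String), Dom_stringmatchrev t p → Spec_stringmatchrev t p (stringmatchrev t p)

-- ===== LEMMAS AND PROOFS =====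

-- pyGet? at a nonnegative index is plain getElem?
lemma pvGet_nonneg {α : Type} (xs : List α) (i : Int) (h : 0 ≤ i) :
    PySem.List.pyGet? xs i = xs[i.toNat]? := by
  simp only [PySem.List.pyGet?, PySem.List.pyIdx?, if_pos h]
  split
  · simp
  · rename_i hlt
    rw [List.getElem?_eq_none (by omega)]
    simp

-- A's inner loop with matched = false returns false
lemma pvAInner_false (tl pl : List Char) (i : Int) (j : Int) :
    pvAInner tl pl i j false = false := by
  rw [pvAInner]; simp

-- characterisation of A's inner loop
lemma pvAInner_true (tl pl : List Char) (i : Int) : ∀ (j : Int),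
    (pvAInner tl pl i j true = true ↔
      ∀ k : Nat, (k : Int) ≤ j →
        (PySem.List.pyGet? pl (k : Int) = some '$' ∨
         PySem.List.pyGet? tl (i + (k : Int)) = PySem.List.pyGet? pl (k : Int))) := by
  intro j
  induction hj : (j + 1).toNat using Nat.strong_induction_on generalizing j with
  | _ n ih =>
    by_cases h0 : 0 ≤ j
    · rw [pvAInner]
      simp only [h0, true_and, dite_true]
      by_cases hm : PySem.List.pyGet? tl (i + j) ≠ PySem.List.pyGet? pl j ∧
          PySem.List.pyGet? pl j ≠ some '$'
      · rw [if_pos hm, pvAInner_false]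
        constructor
        · intro hfalse; exact absurd hfalse (by simp)
        · intro hall
          have := hall j.toNat (by omega)
          rw [show ((j.toNat : Int)) = j by omega] at this
          rcases this with h1 | h2
          · exact absurd h1 hm.2
          · exact absurd h2 hm.1
      · rw [if_neg hm]
        rw [ih (j - 1 + 1).toNat (by omega) (j - 1) rfl]
        simp only [not_and, not_not] at hm
        constructor
        · intro hall k hk
          by_cases hkj : (k : Int) ≤ j - 1
          · exact hall k hkj
          · have hkeq : (k : Int) = j := by omega
            rw [hkeq]
            by_cases hd : PySem.List.pyGet? pl j = some '$'
            · exact Or.inl hd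
            · exact Or.inr (by
                by_contra hne
                exact hd (hm hne))
        · intro hall k hk
          exact hall k (by omega)
    · rw [pvAInner]
      simp only [dite_eq_ite]
      rw [if_neg (by omega)]
      constructor
      · intro _ k hk; omega
      · intro _; rfl

-- bit k of masks.get(c, 0) is set iff t[k] = c
lemma pvBMasks_aux (xs : List Char) : ∀ (s : Nat) (d : PySem.Dict Char Nat) (c : Char) (k : Nat),
    ((((PySem.List.enumerate xs (s : Int)).foldl
        (fun d ic => d.insert ic.2 ((d.getD ic.2 0) ||| (1 <<< ic.1.toNat))) d).getD c 0).testBit k = true ↔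
      ((d.getD c 0).testBit k = true ∨ ∃ j : Nat, xs[j]? = some c ∧ k = s + j)) := by
  intro s d c k
  induction xs generalizing s d with
  | nil => simp [PySem.List.enumerate_nil]
  | cons x rest ih =>
    rw [PySem.List.enumerate_cons, List.foldl_cons]
    have hc : ((s : Int) + 1) = ((s + 1 : Nat) : Int) := by push_cast; ring
    rw [hc, ih (s + 1)]
    have htn : ((s : Int)).toNat = s := Int.toNat_natCast s
    by_cases hcx : c = x
    · subst hcx
      rw [htn, PySem.Dict.getD_insert_self]
      rw [show (1 <<< s) = 2 ^ s from Nat.one_shiftLeft s]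
      simp only [Nat.testBit_or, Nat.testBit_two_pow, Bool.or_eq_true, decide_eq_true_eq]
      constructor
      · rintro (((hb | hs) | ⟨j, hj, hk⟩))
        · exact Or.inl hb
        · exact Or.inr ⟨0, by simp, by omega⟩
        · exact Or.inr ⟨j + 1, by simpa using hj, by omega⟩
      · rintro (hb | ⟨j, hj, hk⟩)
        · exact Or.inl (Or.inl hb)
        · cases j with
          | zero => exact Or.inl (Or.inr (by omega))
          | succ j' => exact Or.inr ⟨j', by simpa using hj, by omega⟩
    · rw [htn, PySem.Dict.getD_insert_of_ne _ _ _ hcx]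
      constructor
      · rintro (hb | ⟨j, hj, hk⟩)
        · exact Or.inl hb
        · exact Or.inr ⟨j + 1, by simpa using hj, by omega⟩
      · rintro (hb | ⟨j, hj, hk⟩)
        · exact Or.inl hb
        · cases j with
          | zero =>
            have hx : x = c := by simpa using hj
            exact absurd hx.symm hcx
          | succ j' => exact Or.inr ⟨j', by simpa using hj, by omega⟩

lemma pvBMasks_spec (tl : List Char) (c : Char) (k : Nat) :
    (((pvBMasks tl).getD c 0).testBit k = true ↔ tl[k]? = some c) := by
  unfold pvBMasks
  rw [show (0 : Int) = ((0 : Nat) : Int) from rfl, pvBMasks_aux tl 0 PySem.Dict.empty c k]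
  constructor
  · rintro (hb | ⟨j, hj, hk⟩)
    · rw [show (PySem.Dict.empty : PySem.Dict Char Nat).getD c 0 = 0 from rfl] at hb
      simp at hb
    · rw [hk, Nat.zero_add]; exact hj
  · intro h; exact Or.inr ⟨k, h, by omega⟩

-- bit i of the pattern fold, with an arbitrary enumerate start
lemma pvBCand_aux (tl : List Char) : ∀ (ps : List Char) (s : Nat) (acc : Nat) (i : Nat),
    (((PySem.List.enumerate ps (s : Int)).foldl
        (fun c jc => if jc.2 ≠ '$' then c &&& (((pvBMasks tl).getD jc.2 0) >>> jc.1.toNat) else c)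
        acc).testBit i = true ↔
      (acc.testBit i = true ∧
        ∀ (j : Nat) (c : Char), ps[j]? = some c → c ≠ '$' → tl[i + (s + j)]? = some c)) := by
  intro ps
  induction ps with
  | nil => intro s acc i; simp [PySem.List.enumerate_nil]
  | cons c rest ih =>
    intro s acc i
    rw [PySem.List.enumerate_cons, List.foldl_cons]
    have hc1 : ((s : Int) + 1) = ((s + 1 : Nat) : Int) := by push_cast; ring
    have hsplit : (∀ (j : Nat) (c' : Char), (c :: rest)[j]? = some c' → c' ≠ '$' → tl[i + (s + j)]? = some c')
        ↔ ((c ≠ '$' → tl[i + s]? = some c) ∧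
           ∀ (j : Nat) (c' : Char), rest[j]? = some c' → c' ≠ '$' → tl[i + (s + 1 + j)]? = some c') := by
      constructor
      · intro h
        refine ⟨fun hne => by simpa using h 0 c (by simp) hne, fun j c' hj hne => ?_⟩
        have h2 := h (j + 1) c' (by simpa using hj) hne
        have e : i + (s + (j + 1)) = i + (s + 1 + j) := by omega
        rw [e] at h2; exact h2
      · rintro ⟨h0, h1⟩ j c' hj hne
        cases j with
        | zero =>
          have : c = c' := by simpa using hj
          subst this
          simpa using h0 hne
        | succ j' =>
          have h2 := h1 j' c' (by simpa using hj) hne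
          have e : i + (s + (j' + 1)) = i + (s + 1 + j') := by omega
          rw [e]; exact h2
    rw [hsplit]
    by_cases hc : c = '$'
    · simp only [hc, ne_eq, not_true_eq_false, if_false]
      rw [hc1, ih (s + 1) acc i]
      constructor
      · rintro ⟨ha, h1⟩; exact ⟨ha, fun hf => hf.elim, h1⟩
      · rintro ⟨ha, _, h1⟩; exact ⟨ha, h1⟩
    · rw [if_pos hc, hc1, ih (s + 1) _ i]
      have htn : ((s : Int)).toNat = s := Int.toNat_natCast s
      rw [htn]
      simp only [Nat.testBit_and, Bool.and_eq_true, Nat.testBit_shiftRight]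
      rw [pvBMasks_spec tl c (s + i)]
      have e2 : s + i = i + s := by omega
      rw [e2]
      constructor
      · rintro ⟨⟨ha, hm⟩, h1⟩; exact ⟨ha, fun _ => hm, h1⟩
      · rintro ⟨ha, h0, h1⟩; exact ⟨⟨ha, h0 hc⟩, h1⟩

lemma pvBCand_spec (tl ps : List Char) (start i : Nat) :
    ((pvBCand (pvBMasks tl) ps start).testBit i = true ↔
      (start.testBit i = true ∧
        ∀ (j : Nat) (c : Char), ps[j]? = some c → c ≠ '$' → tl[i + j]? = some c)) := by
  unfold pvBCand
  have h := pvBCand_aux tl ps 0 start i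
  rw [show ((0 : Nat) : Int) = (0 : Int) from rfl] at h
  simpa using h

-- A's matched flag agrees with the per-position match predicate
lemma pvMatched_iff (tl pl : List Char) (i : Int) (hi : 0 ≤ i) :
    (pvAInner tl pl i ((pl.length : Int) - 1) true = true ↔
      ∀ (j : Nat) (c : Char), pl[j]? = some c → c ≠ '$' → tl[i.toNat + j]? = some c) := by
  rw [pvAInner_true]
  have hA : ∀ k : Nat, PySem.List.pyGet? pl (k : Int) = pl[k]? := fun k => by
    rw [pvGet_nonneg pl k (by omega)]; simp
  have hB : ∀ k : Nat, PySem.List.pyGet? tl (i + (k : Int)) = tl[i.toNat + k]? := fun k => by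
    rw [pvGet_nonneg tl _ (by omega)]
    congr 1
    omega
  constructor
  · intro h j c hj hc
    have hjlen : j < pl.length := by
      by_contra hge
      rw [List.getElem?_eq_none (by omega)] at hj
      simp at hj
    have h2 := h j (by omega)
    rw [hA, hB, hj] at h2
    rcases h2 with h2 | h2
    · exact absurd (Option.some.inj h2) hc
    · exact h2
  · intro h k hk
    have hklen : k < pl.length := by omega
    rw [hA, hB]
    have hcs : pl[k]? = some pl[k] := List.getElem?_eq_getElem hklen
    by_cases hc : pl[k] = '$'
    · left; rw [hcs, hc]
    · right; rw [hcs]; exact h k pl[k] hcs hc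

lemma pvFilterMap_if {α β : Type} (l : List α) (q : α → Prop) [DecidablePred q] (f : α → β) :
    l.filterMap (fun x => if q x then some (f x) else none) =
      (l.filter (fun x => decide (q x))).map f := by
  induction l with
  | nil => simp
  | cons x xs ih => by_cases h : q x <;> simp [h, ih]

-- ===== VERDICT (by name: the statement is the Claim_ definition above) =====
-- testBit as the '(x >> k) & 1' idiom of Source B
lemma pvTestBit_idiom (x k : Nat) : (x.testBit k = true ↔ (x >>> k) &&& 1 = 1) := by
  simp [Nat.testBit, Nat.and_one_is_mod]

-- ===== VERDICT (by name: the statement is the Claim_ definition above) =====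
theorem stringmatchrev_spec : Claim_equal_stringmatchrev := by
  intro t p _
  unfold Spec_stringmatchrev
  rw [stringmatchrev, stringmatchrev_alt]
  by_cases hmn : p.toList.length > t.toList.length
  · rw [if_pos hmn]
    rw [PySem.List.pyRange_one_eq_nil (by omega)]
    simp
  · rw [if_neg hmn]
    rw [PySem.List.foldl_append_if]
    rw [pvFilterMap_if]
    rw [List.nil_append]
    congr 1
    apply List.filter_congr
    intro i hi
    rw [PySem.List.mem_pyRange_one] at hi
    obtain ⟨hi0, hiN⟩ := hi
    have hiff1 := pvMatched_iff t.toList p.toList i hi0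
    have hiff2 := pvBCand_spec t.toList p.toList
      ((1 <<< (t.toList.length - p.toList.length + 1)) - 1) i.toNat
    rw [Nat.one_shiftLeft, Nat.testBit_two_pow_sub_one] at hiff2
    have hlt : i.toNat < t.toList.length - p.toList.length + 1 := by omega
    simp only [hlt, decide_true, true_and] at hiff2
    rw [Bool.eq_iff_iff, hiff1, decide_eq_true_iff, ← pvTestBit_idiom, Nat.one_shiftLeft]
    exact hiff2.symm
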